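-- pv_equiv track=rewrite | github.com/ptorras/chess-recog | src/create_dataset.py | eng2cat
-- ===== SOURCE A (Python) =====
-- def eng2cat(original_string):
--     piece_names_eng = ["N", "Q", "K", "P", "B", "R"]
--     piece_names_eng_ = ["n", "q", "k", "p", "b", "r"]
--     piece_names_cat = ["C", "D", "R", "P", "A", "T"]
--     piece_names_cat_ = ["c", "d", "r", "p", "a", "t"]
--
--     for letter in range(len(piece_names_eng)):
--         original_string = original_string.replace(
--             piece_names_eng[letter], piece_names_cat[letter]
--         )
--         original_string = original_string.replace(
--             piece_names_eng_[letter], piece_names_cat_[letter]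
--         )
--     return original_string
-- ===== SOURCE B (Python) =====
-- def eng2cat(original_string):
--     # Net effect of A's cascade of replaces (K->R happens before R->T, so K ends as T).
--     table = {
--         "N": "C", "Q": "D", "K": "T", "P": "P", "B": "A", "R": "T",
--         "n": "c", "q": "d", "k": "t", "p": "p", "b": "a", "r": "t",
--     }
--     out = []
--     for ch in original_string:
--         out.append(table.get(ch, ch))
--     return "".join(out)
-- ===== Notes on version B (the rewrite author's own statement) =====
-- stated objective: simpler
-- what changed: Replaces A's twelve full-string replace passes with one precomputed net-translation table (folding the K->R->T cascade) and a single per-character pass.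
import Mathlib
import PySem

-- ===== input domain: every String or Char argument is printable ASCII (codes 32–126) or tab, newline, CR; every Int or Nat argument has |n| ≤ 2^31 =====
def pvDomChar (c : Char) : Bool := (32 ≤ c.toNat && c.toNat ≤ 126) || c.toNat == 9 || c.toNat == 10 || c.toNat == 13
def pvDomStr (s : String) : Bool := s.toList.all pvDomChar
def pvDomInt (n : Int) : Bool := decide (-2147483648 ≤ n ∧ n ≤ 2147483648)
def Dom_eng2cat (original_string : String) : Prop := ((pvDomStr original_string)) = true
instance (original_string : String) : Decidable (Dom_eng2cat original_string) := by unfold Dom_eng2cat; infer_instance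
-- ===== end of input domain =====

-- B replaces A's twelve full-string replace passes with one net-translation table and a single per-character pass (simpler; not claimed faster).


-- ===== PORT A =====
def eng2cat (original_string : String) : String :=
  let piece_names_eng : List String := ["N", "Q", "K", "P", "B", "R"]
  let piece_names_eng_ : List String := ["n", "q", "k", "p", "b", "r"]
  let piece_names_cat : List String := ["C", "D", "R", "P", "A", "T"]
  let piece_names_cat_ : List String := ["c", "d", "r", "p", "a", "t"]
  (PySem.List.pyRange 0 (Int.ofNat piece_names_eng.length) 1).foldl
    (fun s letter =>
      let s := PySem.Str.replace s (PySem.List.pyGetD piece_names_eng letter "")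
        (PySem.List.pyGetD piece_names_cat letter "")
      PySem.Str.replace s (PySem.List.pyGetD piece_names_eng_ letter "")
        (PySem.List.pyGetD piece_names_cat_ letter ""))
    original_string

-- ===== PORT B =====
def eng2catTable : PySem.Dict Char Char :=
  ⟨[('N','C'),('Q','D'),('K','T'),('P','P'),('B','A'),('R','T'),
    ('n','c'),('q','d'),('k','t'),('p','p'),('b','a'),('r','t')]⟩

def eng2cat_alt (original_string : String) : String :=
  String.ofList
    (original_string.toList.foldl
      (fun out ch => out ++ [PySem.Dict.getD eng2catTable ch ch]) [])

-- ===== PRECONDITION & SPEC =====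
def Spec_eng2cat (original_string : String) (out : String) : Prop := out = eng2cat_alt original_string
instance (original_string : String) (out : String) : Decidable (Spec_eng2cat original_string out) := by unfold Spec_eng2cat; infer_instance

-- ===== CLAIM (what is proved, stated in full; the proofs are below) =====
def Claim_equal_eng2cat : Prop := ∀ (original_string : String), Dom_eng2cat original_string → Spec_eng2cat original_string (eng2cat original_string)

-- ===== LEMMAS AND PROOFS =====

def pvStep (a b c : Char) : Char := if c = a then b else c

-- single-character replace is a character map
theorem replace_go_single (a b : Char) :
    ∀ (l : List Char) (fuel : Nat) (acc : List Char), l.length ≤ fuel →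
      PySem.Chars.replace.go [a] [b] fuel l acc
        = acc.reverse ++ l.map (pvStep a b) := by
  intro l
  induction l with
  | nil =>
    intro fuel acc _
    cases fuel <;> simp [PySem.Chars.replace.go]
  | cons c t ih =>
    intro fuel acc h
    cases fuel with
    | zero => simp at h
    | succ f =>
      simp only [PySem.Chars.replace.go]
      by_cases hc : c = a
      · subst hc
        simp only [List.isPrefixOf, BEq.rfl, Bool.true_and, if_pos]
        rw [show List.drop (List.length [c]) (c :: t) = t from rfl,
            ih _ _ (Nat.le_of_succ_le_succ h)]
        simp [pvStep]
      · have : List.isPrefixOf [a] (c :: t) = false := by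
          simp [List.isPrefixOf]
          exact fun hh => absurd hh.symm hc
        rw [this]
        simp only [Bool.false_eq_true, if_false]
        rw [ih _ _ (Nat.le_of_succ_le_succ h)]
        simp [pvStep, hc]

theorem replace_single (a b : Char) (l : List Char) :
    PySem.Chars.replace l [a] [b] = l.map (pvStep a b) := by
  unfold PySem.Chars.replace
  simp only [List.isEmpty_cons, Bool.false_eq_true, if_false]
  exact replace_go_single a b l l.length [] (le_refl _)

-- the net effect of the twelve-pass cascade on a single character equals the table lookup
theorem cascade_eq_table (c : Char) :
    pvStep 'r' 't' (pvStep 'R' 'T' (pvStep 'b' 'a' (pvStep 'B' 'A' (pvStep 'p' 'p' (pvStep 'P' 'P' (pvStep 'k' 'r' (pvStep 'K' 'R' (pvStep 'q' 'd' (pvStep 'Q' 'D' (pvStep 'n' 'c' (pvStep 'N' 'C' (c)))))))))))) = PySem.Dict.getD eng2catTable c c := by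
  by_cases h1 : c = 'N'; · subst h1; rfl
  by_cases h2 : c = 'n'; · subst h2; rfl
  by_cases h3 : c = 'Q'; · subst h3; rfl
  by_cases h4 : c = 'q'; · subst h4; rfl
  by_cases h5 : c = 'K'; · subst h5; rfl
  by_cases h6 : c = 'k'; · subst h6; rfl
  by_cases h7 : c = 'P'; · subst h7; rfl
  by_cases h8 : c = 'p'; · subst h8; rfl
  by_cases h9 : c = 'B'; · subst h9; rfl
  by_cases h10 : c = 'b'; · subst h10; rfl
  by_cases h11 : c = 'R'; · subst h11; rfl
  by_cases h12 : c = 'r'; · subst h12; rfl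
  have g1 : (('N' : Char) == c) = false := beq_eq_false_iff_ne.mpr (Ne.symm h1)
  have g2 : (('n' : Char) == c) = false := beq_eq_false_iff_ne.mpr (Ne.symm h2)
  have g3 : (('Q' : Char) == c) = false := beq_eq_false_iff_ne.mpr (Ne.symm h3)
  have g4 : (('q' : Char) == c) = false := beq_eq_false_iff_ne.mpr (Ne.symm h4)
  have g5 : (('K' : Char) == c) = false := beq_eq_false_iff_ne.mpr (Ne.symm h5)
  have g6 : (('k' : Char) == c) = false := beq_eq_false_iff_ne.mpr (Ne.symm h6)
  have g7 : (('P' : Char) == c) = false := beq_eq_false_iff_ne.mpr (Ne.symm h7)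
  have g8 : (('p' : Char) == c) = false := beq_eq_false_iff_ne.mpr (Ne.symm h8)
  have g9 : (('B' : Char) == c) = false := beq_eq_false_iff_ne.mpr (Ne.symm h9)
  have g10 : (('b' : Char) == c) = false := beq_eq_false_iff_ne.mpr (Ne.symm h10)
  have g11 : (('R' : Char) == c) = false := beq_eq_false_iff_ne.mpr (Ne.symm h11)
  have g12 : (('r' : Char) == c) = false := beq_eq_false_iff_ne.mpr (Ne.symm h12)
  simp [pvStep, PySem.Dict.getD, PySem.Dict.get?, eng2catTable, List.find?,
        h1, h2, h3, h4, h5, h6, h7, h8, h9, h10, h11, h12,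
        g1, g2, g3, g4, g5, g6, g7, g8, g9, g10, g11, g12]

theorem foldl_append_singleton (g : Char → Char) :
    ∀ (l acc : List Char),
      l.foldl (fun out ch => out ++ [g ch]) acc = acc ++ l.map g := by
  intro l
  induction l with
  | nil => intro acc; simp
  | cons c t ih => intro acc; simp [List.foldl, ih]

-- ===== VERDICT (by name: the statement is the Claim_ definition above) =====
set_option maxHeartbeats 2000000 in
theorem eng2cat_spec : Claim_equal_eng2cat := by
  intro s _
  unfold Spec_eng2cat eng2cat eng2cat_alt
  rw [foldl_append_singleton]
  have hr : PySem.List.pyRange 0 (Int.ofNat 6) 1 = [0, 1, 2, 3, 4, 5] := by decide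
  simp only [List.length_cons, List.length_nil, hr, List.foldl]
  simp only [show (PySem.List.pyGetD (["N", "Q", "K", "P", "B", "R"] : List String) 0 "") = "N" from rfl,
    show (PySem.List.pyGetD (["C", "D", "R", "P", "A", "T"] : List String) 0 "") = "C" from rfl,
    show (PySem.List.pyGetD (["n", "q", "k", "p", "b", "r"] : List String) 0 "") = "n" from rfl,
    show (PySem.List.pyGetD (["c", "d", "r", "p", "a", "t"] : List String) 0 "") = "c" from rfl,
    show (PySem.List.pyGetD (["N", "Q", "K", "P", "B", "R"] : List String) 1 "") = "Q" from rfl,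
    show (PySem.List.pyGetD (["C", "D", "R", "P", "A", "T"] : List String) 1 "") = "D" from rfl,
    show (PySem.List.pyGetD (["n", "q", "k", "p", "b", "r"] : List String) 1 "") = "q" from rfl,
    show (PySem.List.pyGetD (["c", "d", "r", "p", "a", "t"] : List String) 1 "") = "d" from rfl,
    show (PySem.List.pyGetD (["N", "Q", "K", "P", "B", "R"] : List String) 2 "") = "K" from rfl,
    show (PySem.List.pyGetD (["C", "D", "R", "P", "A", "T"] : List String) 2 "") = "R" from rfl,
    show (PySem.List.pyGetD (["n", "q", "k", "p", "b", "r"] : List String) 2 "") = "k" from rfl,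
    show (PySem.List.pyGetD (["c", "d", "r", "p", "a", "t"] : List String) 2 "") = "r" from rfl,
    show (PySem.List.pyGetD (["N", "Q", "K", "P", "B", "R"] : List String) 3 "") = "P" from rfl,
    show (PySem.List.pyGetD (["C", "D", "R", "P", "A", "T"] : List String) 3 "") = "P" from rfl,
    show (PySem.List.pyGetD (["n", "q", "k", "p", "b", "r"] : List String) 3 "") = "p" from rfl,
    show (PySem.List.pyGetD (["c", "d", "r", "p", "a", "t"] : List String) 3 "") = "p" from rfl,
    show (PySem.List.pyGetD (["N", "Q", "K", "P", "B", "R"] : List String) 4 "") = "B" from rfl,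
    show (PySem.List.pyGetD (["C", "D", "R", "P", "A", "T"] : List String) 4 "") = "A" from rfl,
    show (PySem.List.pyGetD (["n", "q", "k", "p", "b", "r"] : List String) 4 "") = "b" from rfl,
    show (PySem.List.pyGetD (["c", "d", "r", "p", "a", "t"] : List String) 4 "") = "a" from rfl,
    show (PySem.List.pyGetD (["N", "Q", "K", "P", "B", "R"] : List String) 5 "") = "R" from rfl,
    show (PySem.List.pyGetD (["C", "D", "R", "P", "A", "T"] : List String) 5 "") = "T" from rfl,
    show (PySem.List.pyGetD (["n", "q", "k", "p", "b", "r"] : List String) 5 "") = "r" from rfl,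
    show (PySem.List.pyGetD (["c", "d", "r", "p", "a", "t"] : List String) 5 "") = "t" from rfl]
  simp only [PySem.Str.replace, String.toList_ofList]
  simp only [show ("A" : String).toList = ['A'] from rfl,
    show ("B" : String).toList = ['B'] from rfl,
    show ("C" : String).toList = ['C'] from rfl,
    show ("D" : String).toList = ['D'] from rfl,
    show ("K" : String).toList = ['K'] from rfl,
    show ("N" : String).toList = ['N'] from rfl,
    show ("P" : String).toList = ['P'] from rfl,
    show ("Q" : String).toList = ['Q'] from rfl,
    show ("R" : String).toList = ['R'] from rfl,
    show ("T" : String).toList = ['T'] from rfl,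
    show ("a" : String).toList = ['a'] from rfl,
    show ("b" : String).toList = ['b'] from rfl,
    show ("c" : String).toList = ['c'] from rfl,
    show ("d" : String).toList = ['d'] from rfl,
    show ("k" : String).toList = ['k'] from rfl,
    show ("n" : String).toList = ['n'] from rfl,
    show ("p" : String).toList = ['p'] from rfl,
    show ("q" : String).toList = ['q'] from rfl,
    show ("r" : String).toList = ['r'] from rfl,
    show ("t" : String).toList = ['t'] from rfl]
  simp only [replace_single, List.map_map, List.nil_append]
  refine congrArg String.ofList ?_
  apply List.map_congr_left
  intro c _
  simp only [Function.comp_apply]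
  exact cascade_eq_table c
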